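-- pv_equiv track=rewrite | github.com/UgochukwuNmz/tasknotes-alfred | src/list_or_parse_task.py | _parse_quick_filter
-- ===== SOURCE A (Python) =====
-- from typing import Any, Dict, List, Optional, Tuple
--
-- def _parse_quick_filter(query: str) -> Tuple[Optional[str], str]:
--     """
--     Parse quick filter prefix from query.
--
--     Returns: (filter_type, remaining_query)
--     filter_type is one of: 'today', 'tomorrow', 'overdue', 'complete', 'archived', 'p1', 'p2', 'p3', or None
--     """
--     q = query.strip()
--     filters = {
--         "!today": "today",
--         "!tomorrow": "tomorrow",
--         "!overdue": "overdue",
--         "!complete": "complete",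
--         "!archived": "archived",
--         "!p1": "p1",
--         "!p2": "p2",
--         "!p3": "p3",
--     }
--
--     for prefix, filter_type in filters.items():
--         if q.lower() == prefix:
--             return (filter_type, "")
--         if q.lower().startswith(prefix + " "):
--             return (filter_type, q[len(prefix):].strip())
--
--     return (None, query)
-- ===== SOURCE B (Python) =====
-- from typing import Any, Dict, List, Optional, Tuple
--
-- _FILTER_NAMES = ["today", "tomorrow", "overdue", "complete", "archived", "p1", "p2", "p3"]
--
--
-- def _build_trie():
--     """Character trie over the '!'-prefixed filter names; '' marks a terminal node."""
--     root: dict = {}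
--     for name in _FILTER_NAMES:
--         node = root
--         for ch in "!" + name:
--             node = node.setdefault(ch, {})
--         node[""] = name
--     return root
--
--
-- _TRIE = _build_trie()
--
--
-- def _parse_quick_filter(query: str) -> Tuple[Optional[str], str]:
--     """Parse quick filter prefix from query by walking a character trie."""
--     q = query.strip()
--     node = _TRIE
--     i = 0
--     n = len(q)
--     while i < n and q[i].lower() != " ":
--         node = node.get(q[i].lower())
--         if node is None:
--             return (None, query)
--         i += 1
--     name = node.get("")
--     if name is None:
--         return (None, query)
--     return (name, q[i:].strip())
-- ===== Notes on version B (the rewrite author's own statement) =====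
-- stated objective: alternative
-- what changed: Replaces A's for-loop over the 8-entry prefix dict (an equality test plus a startswith prefix+space test per entry) by a character trie built once over the bang-prefixed filter names: the stripped query is walked char by char (lowercased) through the trie until a space or the end, and the terminal marker at that node gives the filter type.
import Mathlib
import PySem

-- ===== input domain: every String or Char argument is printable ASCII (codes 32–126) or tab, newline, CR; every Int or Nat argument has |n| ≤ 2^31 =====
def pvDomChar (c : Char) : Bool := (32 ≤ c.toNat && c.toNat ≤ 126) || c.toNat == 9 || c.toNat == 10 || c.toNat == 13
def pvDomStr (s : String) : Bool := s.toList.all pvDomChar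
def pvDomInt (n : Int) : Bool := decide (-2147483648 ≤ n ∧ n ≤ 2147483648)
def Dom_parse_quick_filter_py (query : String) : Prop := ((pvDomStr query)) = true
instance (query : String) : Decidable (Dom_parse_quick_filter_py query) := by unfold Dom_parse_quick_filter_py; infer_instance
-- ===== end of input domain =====

-- B replaces A's scan over the 8-entry dict (equality + prefix-with-space test per entry) by a
-- character trie over the bang-prefixed filter names, walked once over the query (objective: alternative).

-- ===== PORT A =====
-- the `filters` dict literal, as the association list the for-loop iterates over
def pqfFiltersA : List (List Char × List Char) :=
  [("!today".toList, "today".toList), ("!tomorrow".toList, "tomorrow".toList),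
   ("!overdue".toList, "overdue".toList), ("!complete".toList, "complete".toList),
   ("!archived".toList, "archived".toList), ("!p1".toList, "p1".toList),
   ("!p2".toList, "p2".toList), ("!p3".toList, "p3".toList)]

-- the for-loop with its early returns: recursion over the remaining (prefix, filter_type) items
def pqfLoopA (q : List Char) (query : String) : List (List Char × List Char) → Option String × String
  | [] => (none, query)
  | (pre, ft) :: rest =>
    if PySem.Chars.lower q = pre then (some (String.ofList ft), "")
    else if PySem.Chars.startswith (PySem.Chars.lower q) (pre ++ [' ']) then
      (some (String.ofList ft),
       String.ofList (PySem.Chars.strip (PySem.Chars.slice q (some (pre.length : Int)) none)))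
    else pqfLoopA q query rest

def parse_quick_filter_py (query : String) : Option String × String :=
  pqfLoopA (PySem.Chars.strip query.toList) query pqfFiltersA

-- ===== PORT B =====
-- the trie: a node carries an optional terminal name ('' key in Source B) and a child list
-- (mutual pair instead of a nested inductive, as required)
mutual
inductive PqfTrie where
  | mk : Option (List Char) → PqfChildren → PqfTrie
inductive PqfChildren where
  | nil : PqfChildren
  | cons : Char → PqfTrie → PqfChildren → PqfChildren
end

def pqfTerm : PqfTrie → Option (List Char)
  | .mk t _ => t

def pqfKids : PqfTrie → PqfChildren
  | .mk _ ch => ch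

-- node.get(c) on the child dict
def pqfGetChild : PqfChildren → Char → Option PqfTrie
  | .nil, _ => none
  | .cons k t rest, c => if k = c then some t else pqfGetChild rest c

-- node[c] = t (overwrite in place, else append — dict semantics of the child map)
def pqfSetChild : PqfChildren → Char → PqfTrie → PqfChildren
  | .nil, c, t => .cons c t .nil
  | .cons k u rest, c, t => if k = c then .cons k t rest else .cons k u (pqfSetChild rest c t)

-- the inner `for ch in "!" + name` of _build_trie: setdefault-walk then set the terminal
def pqfInsert : PqfTrie → List Char → List Char → PqfTrie
  | node, [], name => .mk (some name) (pqfKids node)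
  | node, c :: cs, name =>
    .mk (pqfTerm node)
      (pqfSetChild (pqfKids node) c
        (pqfInsert ((pqfGetChild (pqfKids node) c).getD (.mk none .nil)) cs name))

def pqfFilterNames : List (List Char) :=
  ["today".toList, "tomorrow".toList, "overdue".toList, "complete".toList,
   "archived".toList, "p1".toList, "p2".toList, "p3".toList]

-- _TRIE = _build_trie(): fold the names into an empty root
def pqfTrie : PqfTrie :=
  pqfFilterNames.foldl (fun root name => pqfInsert root ('!' :: name) name) (.mk none .nil)

-- the code after the while loop: node.get('') then (name, q[i:].strip()) / (None, query)
def pqfFinish (query : String) (node : PqfTrie) (rest : List Char) : Option String × String :=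
  match pqfTerm node with
  | none => (none, query)
  | some name => (some (String.ofList name), String.ofList (PySem.Chars.strip rest))

-- the while loop: consume lowered chars until a space or the end, descending in the trie
def pqfWalk (query : String) : PqfTrie → List Char → Option String × String
  | node, [] => pqfFinish query node []
  | node, c :: cs =>
    if PySem.Chars.lowerChar c = ' ' then pqfFinish query node (c :: cs)
    else
      match pqfGetChild (pqfKids node) (PySem.Chars.lowerChar c) with
      | none => (none, query)
      | some nxt => pqfWalk query nxt cs

def parse_quick_filter_py_alt (query : String) : Option String × String :=
  pqfWalk query pqfTrie (PySem.Chars.strip query.toList)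

-- ===== PRECONDITION & SPEC =====
def Spec_parse_quick_filter_py (query : String) (out : Option String × String) : Prop := out = parse_quick_filter_py_alt query
instance (query : String) (out : Option String × String) : Decidable (Spec_parse_quick_filter_py query out) := by unfold Spec_parse_quick_filter_py; infer_instance

-- ===== CLAIM (what is proved, stated in full; the proofs are below) =====
def Claim_equal_parse_quick_filter_py : Prop := ∀ (query : String), Dom_parse_quick_filter_py query → Spec_parse_quick_filter_py query (parse_quick_filter_py query)

-- ===== LEMMAS AND PROOFS =====

-- takeWhile (· != ' ') of a space-free list is the whole list
theorem pqf_takeWhile_nospace (P : List Char) (h : ' ' ∉ P) :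
    P.takeWhile (fun c => c != ' ') = P := by
  induction P with
  | nil => rfl
  | cons a t ih =>
    simp only [List.mem_cons, not_or] at h
    simp [bne_iff_ne, Ne.symm h.1, ih h.2]

-- takeWhile (· != ' ') stops exactly at the space after a space-free prefix
theorem pqf_takeWhile_append_space (P r : List Char) (h : ' ' ∉ P) :
    (P ++ ' ' :: r).takeWhile (fun c => c != ' ') = P := by
  induction P with
  | nil => simp
  | cons a t ih =>
    simp only [List.mem_cons, not_or] at h
    simp [bne_iff_ne, Ne.symm h.1, ih h.2]

-- A's two branch tests for a space-free prefix P fire exactly when the first token is P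
theorem pqf_match_iff (L P : List Char) (h : ' ' ∉ P) :
    (L = P ∨ P ++ [' '] <+: L) ↔ L.takeWhile (fun c => c != ' ') = P := by
  constructor
  · rintro (rfl | ⟨r, hr⟩)
    · exact pqf_takeWhile_nospace _ h
    · rw [← hr, List.append_assoc, List.singleton_append]
      exact pqf_takeWhile_append_space P r h
  · intro ht
    rcases hd : L.dropWhile (fun c => c != ' ') with _ | ⟨b, t⟩
    · left
      have := List.takeWhile_append_dropWhile (p := fun c => c != ' ') (l := L)
      rw [ht, hd, List.append_nil] at this
      exact this.symm
    · right
      have hb : b = ' ' := by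
        have h1 := List.head_dropWhile_not (fun c => c != ' ') (l := L) (w := by simp [hd])
        simpa [hd] using h1
      refine ⟨t, ?_⟩
      have := List.takeWhile_append_dropWhile (p := fun c => c != ' ') (l := L)
      rw [ht, hd, hb] at this
      simpa [List.append_assoc] using this

-- A's whole loop equals a single first-token lookup in the same association list
theorem pqf_loop_eq (q : List Char) (query : String) (fs : List (List Char × List Char))
    (hs : ∀ p ∈ fs, ' ' ∉ p.1) :
    pqfLoopA q query fs =
      (match (PySem.Dict.mk fs).get? ((PySem.Chars.lower q).takeWhile (fun c => c != ' ')) with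
       | none => (none, query)
       | some ft =>
          (some (String.ofList ft),
           String.ofList (PySem.Chars.strip (PySem.Chars.slice q
             (some ((((PySem.Chars.lower q).takeWhile (fun c => c != ' ')).length : Int)) ) none)))) := by
  induction fs with
  | nil => rfl
  | cons p rest ih =>
    obtain ⟨pre, ft⟩ := p
    have hpre : ' ' ∉ pre := hs (pre, ft) (List.mem_cons_self ..)
    have hrest : ∀ p ∈ rest, ' ' ∉ p.1 := fun p hp => hs p (List.mem_cons_of_mem _ hp)
    by_cases hfirst : (PySem.Chars.lower q).takeWhile (fun c => c != ' ') = pre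
    · have hql : (PySem.Chars.lower q).length = q.length := by
        simp [PySem.Chars.lower]
      have hget : (PySem.Dict.mk ((pre, ft) :: rest)).get?
          ((PySem.Chars.lower q).takeWhile (fun c => c != ' ')) = some ft := by
        simp [PySem.Dict.get?, hfirst]
      rw [hget]
      rcases (pqf_match_iff (PySem.Chars.lower q) pre hpre).mpr hfirst with heq | hpref
      · have hqlen : q.length = pre.length := by rw [← hql, heq]
        have hslice : PySem.Chars.slice q (some (((PySem.Chars.lower q).takeWhile
            (fun c => c != ' ')).length : Int)) none = [] := by
          rw [hfirst, PySem.Chars.slice_eq_listSlice,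
              PySem.List.slice_from _ (Int.natCast_nonneg _), Int.toNat_natCast, ← hqlen,
              List.drop_length]
        rw [hslice]
        simp only [pqfLoopA]
        rw [if_pos heq]
        rfl
      · have hne : PySem.Chars.lower q ≠ pre := by
          intro he
          have : pre.length + 1 ≤ pre.length := by
            simpa [he] using hpref.length_le
          omega
        have hsw : PySem.Chars.startswith (PySem.Chars.lower q) (pre ++ [' ']) = true :=
          (PySem.Chars.startswith_iff ..).mpr hpref
        simp only [pqfLoopA]
        rw [if_neg hne, if_pos hsw, hfirst]
    · have hnot : ¬ (PySem.Chars.lower q = pre ∨ pre ++ [' '] <+: PySem.Chars.lower q) :=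
        fun hcon => hfirst ((pqf_match_iff _ pre hpre).mp hcon)
      rw [not_or] at hnot
      have hsw : PySem.Chars.startswith (PySem.Chars.lower q) (pre ++ [' ']) = false := by
        rw [← Bool.not_eq_true, PySem.Chars.startswith_iff]
        exact hnot.2
      have hbeq : (pre == (PySem.Chars.lower q).takeWhile (fun c => c != ' ')) = false := by
        rw [beq_eq_false_iff_ne]
        exact fun h => hfirst h.symm
      have hget : (PySem.Dict.mk ((pre, ft) :: rest)).get?
          ((PySem.Chars.lower q).takeWhile (fun c => c != ' ')) =
          (PySem.Dict.mk rest).get? ((PySem.Chars.lower q).takeWhile (fun c => c != ' ')) := by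
        simp [PySem.Dict.get?, List.find?_cons_of_neg, hbeq]
      rw [hget, ← ih hrest]
      simp [pqfLoopA, hnot.1, hsw]

-- ----- B-side: trie lookup characterisation -----

-- proof-side spelling of "follow the word through the trie, read the terminal"
def pqfLookup : PqfTrie → List Char → Option (List Char)
  | node, [] => pqfTerm node
  | node, c :: cs =>
    match pqfGetChild (pqfKids node) c with
    | none => none
    | some nxt => pqfLookup nxt cs

theorem pqf_lookup_empty (t : List Char) : pqfLookup (.mk none .nil) t = none := by
  cases t <;> simp [pqfLookup, pqfTerm, pqfKids, pqfGetChild]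

theorem pqf_getChild_setChild (ch : PqfChildren) (a x : Char) (t : PqfTrie) :
    pqfGetChild (pqfSetChild ch a t) x = if a = x then some t else pqfGetChild ch x := by
  refine PqfChildren.rec (motive_1 := fun _ => True)
    (motive_2 := fun ch => ∀ a x t,
      pqfGetChild (pqfSetChild ch a t) x = if a = x then some t else pqfGetChild ch x)
    (fun _ _ _ => trivial) ?_ ?_ ch a x t
  · intro a x t
    by_cases h : a = x <;> simp [pqfSetChild, pqfGetChild, h]
  · intro k u rest _ ih a x t
    by_cases hk : k = a
    · subst hk
      by_cases h : k = x <;> simp [pqfSetChild, pqfGetChild, h]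
    · by_cases h : a = x
      · subst h
        simp [pqfSetChild, pqfGetChild, hk, ih]
      · simp only [pqfSetChild, if_neg hk]
        by_cases hkx : k = x <;> simp [pqfGetChild, hkx, ih, h]

theorem pqf_insert_lookup (w : List Char) (node : PqfTrie) (name t : List Char) :
    pqfLookup (pqfInsert node w name) t = if t = w then some name else pqfLookup node t := by
  induction w generalizing node t with
  | nil =>
    cases t with
    | nil => simp [pqfInsert, pqfLookup, pqfTerm]
    | cons c cs => simp [pqfInsert, pqfLookup, pqfKids]
  | cons a ws ih =>
    obtain ⟨term, kids⟩ := node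
    cases t with
    | nil => simp [pqfInsert, pqfLookup, pqfTerm]
    | cons c cs =>
      simp only [pqfInsert, pqfLookup, pqfKids, pqfTerm, pqf_getChild_setChild]
      by_cases hc : a = c
      · subst hc
        simp only [List.cons.injEq, true_and, if_true]
        rw [ih]
        by_cases hcs : cs = ws
        · simp [hcs]
        · rw [if_neg hcs, if_neg hcs]
          cases hg : pqfGetChild kids a with
          | some nxt => rfl
          | none => exact pqf_lookup_empty cs
      · rw [if_neg hc, if_neg (fun he => hc (List.cons.injEq .. ▸ he).1.symm)]

-- the built trie answers exactly the association-list lookup of A's filter dict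
theorem pqf_lookup_built (t : List Char) :
    pqfLookup pqfTrie t = (PySem.Dict.mk pqfFiltersA).get? t := by
  simp only [pqfTrie, pqfFilterNames, List.foldl, pqf_insert_lookup, pqf_lookup_empty]
  simp only [PySem.Dict.get?, pqfFiltersA, List.find?]
  by_cases h1 : t = "!today".toList
  · subst h1; decide
  by_cases h2 : t = "!tomorrow".toList
  · subst h2; decide
  by_cases h3 : t = "!overdue".toList
  · subst h3; decide
  by_cases h4 : t = "!complete".toList
  · subst h4; decide
  by_cases h5 : t = "!archived".toList
  · subst h5; decide
  by_cases h6 : t = "!p1".toList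
  · subst h6; decide
  by_cases h7 : t = "!p2".toList
  · subst h7; decide
  by_cases h8 : t = "!p3".toList
  · subst h8; decide
  rw [if_neg (by simpa using h8), if_neg (by simpa using h7), if_neg (by simpa using h6),
      if_neg (by simpa using h5), if_neg (by simpa using h4), if_neg (by simpa using h3),
      if_neg (by simpa using h2), if_neg (by simpa using h1)]
  simp only [beq_eq_false_iff_ne.mpr (fun h => h1 h.symm),
    beq_eq_false_iff_ne.mpr (fun h => h2 h.symm), beq_eq_false_iff_ne.mpr (fun h => h3 h.symm),
    beq_eq_false_iff_ne.mpr (fun h => h4 h.symm), beq_eq_false_iff_ne.mpr (fun h => h5 h.symm),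
    beq_eq_false_iff_ne.mpr (fun h => h6 h.symm), beq_eq_false_iff_ne.mpr (fun h => h7 h.symm),
    beq_eq_false_iff_ne.mpr (fun h => h8 h.symm)]
  rfl

-- the while loop is a first-token trie lookup plus the strip of the remainder
theorem pqf_walk_eq (L : List Char) (query : String) (node : PqfTrie) :
    pqfWalk query node L =
      (match pqfLookup node ((PySem.Chars.lower L).takeWhile (fun c => c != ' ')) with
       | none => (none, query)
       | some name =>
          (some (String.ofList name),
           String.ofList (PySem.Chars.strip
             (L.drop ((PySem.Chars.lower L).takeWhile (fun c => c != ' ')).length)))) := by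
  induction L generalizing node with
  | nil => cases h : pqfTerm node <;> simp [pqfWalk, pqfFinish, pqfLookup, PySem.Chars.lower, h]
  | cons c cs ih =>
    have hl : PySem.Chars.lower (c :: cs) = PySem.Chars.lowerChar c :: PySem.Chars.lower cs := by
      simp [PySem.Chars.lower]
    by_cases hsp : PySem.Chars.lowerChar c = ' '
    · have htw : (PySem.Chars.lower (c :: cs)).takeWhile (fun c => c != ' ') = [] := by
        simp [hl, hsp]
      rw [htw]
      cases h : pqfTerm node <;> simp [pqfWalk, hsp, pqfFinish, pqfLookup, h]
    · have htw : (PySem.Chars.lower (c :: cs)).takeWhile (fun c => c != ' ') =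
          PySem.Chars.lowerChar c :: (PySem.Chars.lower cs).takeWhile (fun c => c != ' ') := by
        simp [hl, bne_iff_ne, hsp]
      rw [htw]
      simp only [pqfWalk, if_neg hsp]
      cases hg : pqfGetChild (pqfKids node) (PySem.Chars.lowerChar c) with
      | none => simp [pqfLookup, hg]
      | some nxt =>
        simp only [pqfLookup, hg, List.length_cons, List.drop_succ_cons]
        exact ih nxt

-- ===== VERDICT (by name: the statement is the Claim_ definition above) =====
theorem parse_quick_filter_py_spec : Claim_equal_parse_quick_filter_py := by
  intro query _
  unfold Spec_parse_quick_filter_py parse_quick_filter_py parse_quick_filter_py_alt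
  rw [pqf_loop_eq _ query pqfFiltersA (by decide), pqf_walk_eq, pqf_lookup_built]
  cases h : (PySem.Dict.mk pqfFiltersA).get?
      ((PySem.Chars.lower (PySem.Chars.strip query.toList)).takeWhile (fun c => c != ' ')) with
  | none => rfl
  | some ft =>
    simp only
    rw [PySem.Chars.slice_eq_listSlice, PySem.List.slice_from _ (Int.natCast_nonneg _),
        Int.toNat_natCast]
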